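-- pv_equiv track=rewrite | github.com/difx/difx | applications/polconvert/trunk/src/PP/checkpolconvertfringe.py | antennaBlock
-- ===== SOURCE A (Python) =====
-- def antennaBlock(legend, antprow, antdict):
--     '''
--     Simply doing str(antdict) is ugly; try for two equal lines
--     if we have more than 8 antennas
--     '''
--     if antprow == 0:
--         if len(antdict) > 10: antprow = (len(antdict) + 1) // 2
--         else:                 antprow = len(antdict)
--     text = [" %d:%s" % (ky,antdict[ky]) for ky in antdict]
--     for runt in range((antprow - len(text) % antprow) % antprow):
--         text.append(' '*5)
--     for endr in range(1+len(text)//antprow):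
--         try:
--             text[endr*antprow + 0] = legend + text[endr*antprow]
--             text[endr*antprow + antprow-1] += '\n'
--         except:
--             pass
--     return ''.join(text)
-- ===== SOURCE B (Python) =====
-- def antennaBlock(legend, antprow, antdict):
--     if antprow == 0:
--         n0 = len(antdict)
--         antprow = (n0 + 1) // 2 if n0 > 10 else n0
--     items = list(antdict.items())
--     n = len(items)
--     total = n + (antprow - n % antprow) % antprow
--     parts = []
--     for i in range(total):
--         if i % antprow == 0:
--             parts.append(legend)
--         if i < n:
--             ky, val = items[i]
--             parts.append(" %d:%s" % (ky, val))
--         else: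
--             parts.append(' ' * 5)
--         if i % antprow == antprow - 1:
--             parts.append('\n')
--     return ''.join(parts)
-- ===== Notes on version B (the rewrite author's own statement) =====
-- stated objective: alternative
-- what changed: B never builds or mutates a padded cell list: it makes one flat pass over position indices 0..total-1, generating each cell on the fly (formatted item or padding) and deciding legend/newline insertion by modular arithmetic (i % antprow), instead of A's staged build-pad-then-mutate-rows-by-index-with-try/except.
-- outside the precondition, e.g. on antennaBlock('#', -2, {1: 'x'}): A returns ' 1:x', B returns ''; on antennaBlock('#', 0, {}): A raises ZeroDivisionError, B raises ZeroDivisionError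
import Mathlib
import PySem

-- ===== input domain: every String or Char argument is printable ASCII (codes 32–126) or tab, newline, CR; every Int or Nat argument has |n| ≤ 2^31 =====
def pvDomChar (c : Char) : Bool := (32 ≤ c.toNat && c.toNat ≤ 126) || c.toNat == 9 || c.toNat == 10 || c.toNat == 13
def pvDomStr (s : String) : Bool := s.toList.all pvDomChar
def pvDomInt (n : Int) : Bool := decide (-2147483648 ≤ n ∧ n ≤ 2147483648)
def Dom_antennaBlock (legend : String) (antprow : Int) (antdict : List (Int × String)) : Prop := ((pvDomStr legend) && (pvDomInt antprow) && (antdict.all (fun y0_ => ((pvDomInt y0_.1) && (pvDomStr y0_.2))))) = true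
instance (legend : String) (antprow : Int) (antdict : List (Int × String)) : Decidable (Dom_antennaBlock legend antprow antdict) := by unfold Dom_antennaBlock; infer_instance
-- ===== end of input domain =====

-- B makes one flat pass over position indices, generating each cell on the fly (item or padding) and
-- inserting legend/newline by modular tests, instead of A's staged build-pad-then-mutate-rows-by-index
-- with try/except (objective: alternative decomposition, same cost).

-- ===== PORT A =====
-- Python list assignment `t[i] = v` (an out-of-range index raises IndexError, which A's bare
-- `except: pass` swallows, leaving t unchanged)
def pvSetCell (t : List (List Char)) (i : Int) (v : List Char) : List (List Char) :=
  match PySem.List.pyIdx? t.length i with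
  | some k => t.set k v
  | none => t

-- the body of A's `for endr …` loop: a try block of two indexed assignments; a failing lookup
-- raises and the rest of the block is skipped (bare `except: pass`)
def pvStepA (legend : List Char) (antprow : Int) (t : List (List Char)) (endr : Int) : List (List Char) :=
  match PySem.List.pyGet? t (endr * antprow + 0) with
  | none => t
  | some c0 =>
    match PySem.List.pyGet? (pvSetCell t (endr * antprow + 0) (legend ++ c0)) (endr * antprow + antprow - 1) with
    | none => pvSetCell t (endr * antprow + 0) (legend ++ c0)
    | some c1 =>
        pvSetCell (pvSetCell t (endr * antprow + 0) (legend ++ c0)) (endr * antprow + antprow - 1) (c1 ++ ['\n'])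

def antennaBlock (legend : String) (antprow : Int) (antdict : List (Int × String)) : String :=
  let items := (PySem.Dict.ofList antdict).items
  let antprow : Int :=
    if antprow = 0 then
      if (items.length : Int) > 10 then PySem.Int.floordiv ((items.length : Int) + 1) 2
      else (items.length : Int)
    else antprow
  let text : List (List Char) := items.map (fun kv => ' ' :: (PySem.Int.toChars kv.1 ++ ':' :: kv.2.toList))
  let text := (PySem.List.pyRange 0 (PySem.Int.mod (antprow - PySem.Int.mod (text.length : Int) antprow) antprow) 1).foldl
      (fun t _ => t ++ [[' ', ' ', ' ', ' ', ' ']]) text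
  let text := (PySem.List.pyRange 0 (1 + PySem.Int.floordiv (text.length : Int) antprow) 1).foldl
      (pvStepA legend.toList antprow) text
  String.ofList text.flatten

-- ===== PORT B =====
-- the three appends Source B makes for position i, concatenated: optional legend (row start, i % antprow
-- == 0), the cell itself (formatted item if i < n, else five spaces), optional newline (row end,
-- i % antprow == antprow - 1)
def pvPiece (legend : List Char) (items : List (Int × String)) (n P i : Int) : List Char :=
  (if PySem.Int.mod i P = 0 then legend else []) ++
  (if i < n then
      (match PySem.List.pyGet? items i with
       | some kv => ' ' :: (PySem.Int.toChars kv.1 ++ ':' :: kv.2.toList)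
       | none => [])   -- unreachable: 0 ≤ i < n = len(items)
    else [' ', ' ', ' ', ' ', ' ']) ++
  (if PySem.Int.mod i P = P - 1 then ['\n'] else [])

def antennaBlock_alt (legend : String) (antprow : Int) (antdict : List (Int × String)) : String :=
  let items := (PySem.Dict.ofList antdict).items
  let n : Int := items.length
  let P : Int := if antprow = 0 then (if n > 10 then PySem.Int.floordiv (n + 1) 2 else n) else antprow
  let total : Int := n + PySem.Int.mod (P - PySem.Int.mod n P) P
  String.ofList ((PySem.List.pyRange 0 total 1).foldl
    (fun acc i => acc ++ pvPiece legend.toList items n P i) [])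

-- ===== PRECONDITION & SPEC =====
-- Pre_ restricts to the natural domain: a negative antprow is a degenerate row width (on which A
-- happens to return the bare unformatted concatenation of the cells, an artefact of its empty
-- ranges); and antprow == 0 with an empty dict makes A raise ZeroDivisionError.
def Pre_antennaBlock (legend : String) (antprow : Int) (antdict : List (Int × String)) : Prop :=
  0 ≤ antprow ∧ ¬(antprow = 0 ∧ antdict = [])
instance (legend : String) (antprow : Int) (antdict : List (Int × String)) : Decidable (Pre_antennaBlock legend antprow antdict) := by unfold Pre_antennaBlock; infer_instance

def pvWitness_antennaBlock : String × Int × (List (Int × String)) := ("IF ", 2, [(1, "AA"), (2, "BB"), (3, "CC")])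

def Spec_antennaBlock (legend : String) (antprow : Int) (antdict : List (Int × String)) (out : String) : Prop := out = antennaBlock_alt legend antprow antdict
instance (legend : String) (antprow : Int) (antdict : List (Int × String)) (out : String) : Decidable (Spec_antennaBlock legend antprow antdict out) := by unfold Spec_antennaBlock; infer_instance

-- ===== CLAIM (what is proved, stated in full; the proofs are below) =====
def Claim_equal_antennaBlock : Prop := ∀ (legend : String) (antprow : Int) (antdict : List (Int × String)), Dom_antennaBlock legend antprow antdict → Pre_antennaBlock legend antprow antdict → Spec_antennaBlock legend antprow antdict (antennaBlock legend antprow antdict)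

-- ===== LEMMAS AND PROOFS =====

-- Python `row[-1] += '\n'` on a nonempty list of cells
def pvLastNL : List (List Char) → List (List Char)
  | [] => []
  | [c] => [c ++ ['\n']]
  | c :: c2 :: rest => c :: pvLastNL (c2 :: rest)

-- one formatted row: legend prepended to the first cell, '\n' appended to the last
def pvDecorate (legend : List Char) (row : List (List Char)) : List (List Char) :=
  match row with
  | [] => []
  | c :: rest => pvLastNL ((legend ++ c) :: rest)

-- the common normal form: the padded cell list consumed row by row
def pvGold (legend : List Char) (p : Nat) : Nat → List (List Char) → List (List Char)
  | 0, _ => []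
  | k + 1, T => pvDecorate legend (T.take p) ++ pvGold legend p k (T.drop p)

theorem pv_pyIdx?_natCast (n j : Nat) :
    PySem.List.pyIdx? n ((j : Nat) : Int) = if j < n then some j else none := by
  simp only [PySem.List.pyIdx?]
  split_ifs <;> simp_all
theorem pv_setCell_append_nat (front rest : List (List Char)) (j : Nat) (v : List Char) :
    pvSetCell (front ++ rest) ((front.length + j : Nat) : Int) v = front ++ pvSetCell rest ((j : Nat) : Int) v := by
  simp only [pvSetCell, pv_pyIdx?_natCast, List.length_append]
  by_cases h : j < rest.length
  · rw [if_pos (by omega), if_pos h]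
    dsimp only
    rw [List.set_append_right _ _ (by omega)]
    simp
  · rw [if_neg (by omega), if_neg h]
theorem pv_setCell_cons_succ (a : List Char) (X : List (List Char)) (j : Nat) (v : List Char) :
    pvSetCell (a :: X) ((j + 1 : Nat) : Int) v = a :: pvSetCell X ((j : Nat) : Int) v := by
  simp only [pvSetCell, pv_pyIdx?_natCast, List.length_cons]
  by_cases h : j < X.length
  · rw [if_pos (by omega), if_pos h]
    dsimp only
    rw [List.set_cons_succ]
  · rw [if_neg (by omega), if_neg h]
theorem pv_pyGet?_cons_succ {α : Type} (a : α) (X : List α) (j : Nat) :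
    PySem.List.pyGet? (a :: X) ((j + 1 : Nat) : Int) = PySem.List.pyGet? X ((j : Nat) : Int) := by
  rw [PySem.List.pyGet?_natCast, PySem.List.pyGet?_natCast]
  simp
theorem pv_pyGet?_append_nat {α : Type} (front rest : List α) (j : Nat) :
    PySem.List.pyGet? (front ++ rest) ((front.length + j : Nat) : Int) = PySem.List.pyGet? rest (j : Int) := by
  rw [PySem.List.pyGet?_natCast, PySem.List.pyGet?_natCast,
    List.getElem?_append_right (by omega)]
  simp
theorem pv_step_shift (legend : List Char) (p : Nat) (hp : 0 < p) (front rest : List (List Char))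
    (hf : front.length = p) (e : Nat) :
    pvStepA legend (p : Int) (front ++ rest) ((e + 1 : Nat) : Int)
      = front ++ pvStepA legend (p : Int) rest ((e : Nat) : Int) := by
  have hp1 : 1 ≤ p := hp
  simp only [pvStepA]
  rw [show ((e + 1 : Nat) : Int) * (p : Int) + 0 = ((front.length + e * p : Nat) : Int) by push_cast; rw [hf]; ring]
  rw [pv_pyGet?_append_nat]
  rw [show ((e : Nat) : Int) * (p : Int) + 0 = ((e * p : Nat) : Int) by push_cast; ring]
  cases hg : PySem.List.pyGet? rest ((e * p : Nat) : Int) with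
  | none => rfl
  | some c0 =>
    dsimp only
    rw [pv_setCell_append_nat]
    rw [show ((e + 1 : Nat) : Int) * (p : Int) + (p : Int) - 1 = ((front.length + (e * p + (p - 1)) : Nat) : Int) by
      push_cast [Nat.cast_sub hp1]; rw [hf]; ring]
    rw [pv_pyGet?_append_nat]
    rw [show ((e : Nat) : Int) * (p : Int) + (p : Int) - 1 = ((e * p + (p - 1) : Nat) : Int) by
      push_cast [Nat.cast_sub hp1]; ring]
    cases hg2 : PySem.List.pyGet? (pvSetCell rest ((e * p : Nat) : Int) (legend ++ c0)) ((e * p + (p - 1) : Nat) : Int) with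
    | none => rfl
    | some c1 =>
      dsimp only
      rw [pv_setCell_append_nat]
theorem pvLastNL_length (l : List (List Char)) : (pvLastNL l).length = l.length := by
  fun_induction pvLastNL l <;> simp [*]
theorem pvDecorate_length (legend : List Char) (row : List (List Char)) :
    (pvDecorate legend row).length = row.length := by
  cases row <;> simp [pvDecorate, pvLastNL_length]

theorem pv_lastNL_as_set : ∀ (cs : List (List Char)), cs ≠ [] → ∀ (rest : List (List Char)),
    (match PySem.List.pyGet? (cs ++ rest) ((cs.length - 1 : Nat) : Int) with
      | none => cs ++ rest
      | some c1 => pvSetCell (cs ++ rest) ((cs.length - 1 : Nat) : Int) (c1 ++ ['\n']))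
      = pvLastNL cs ++ rest
  | [], h, _ => absurd rfl h
  | [c], _, rest => by
    rw [show (([c] : List (List Char)).length - 1 : Nat) = 0 from rfl]
    rw [List.cons_append, List.nil_append, PySem.List.pyGet?_natCast]
    simp only [List.getElem?_cons_zero]
    simp only [pvSetCell, pv_pyIdx?_natCast, List.length_cons]
    rw [if_pos (by omega)]
    rfl
  | c :: c2 :: cs', _, rest => by
    have ih := pv_lastNL_as_set (c2 :: cs') (by simp) rest
    rw [show ((c :: c2 :: cs').length - 1 : Nat) = ((c2 :: cs').length - 1) + 1 by simp]
    rw [List.cons_append, pv_pyGet?_cons_succ]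
    cases hg : PySem.List.pyGet? ((c2 :: cs') ++ rest) ((((c2 :: cs').length - 1 : Nat)) : Int) with
    | none =>
      rw [hg] at ih
      dsimp only at ih ⊢
      exact congrArg (List.cons c) ih
    | some c1 =>
      rw [hg] at ih
      dsimp only at ih ⊢
      rw [pv_setCell_cons_succ]
      exact congrArg (List.cons c) ih

theorem pv_step_zero (legend : List Char) (p : Nat) (hp : 0 < p) (row rest : List (List Char))
    (hr : row.length = p) :
    pvStepA legend (p : Int) (row ++ rest) 0 = pvDecorate legend row ++ rest := by
  cases row with
  | nil => simp at hr; omega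
  | cons c cs =>
    simp only [pvStepA]
    rw [show (0 : Int) * (p : Int) + 0 = ((0 : Nat) : Int) by norm_num]
    rw [List.cons_append, PySem.List.pyGet?_natCast]
    simp only [List.getElem?_cons_zero]
    have hset : pvSetCell (c :: (cs ++ rest)) ((0 : Nat) : Int) (legend ++ c)
        = (legend ++ c) :: (cs ++ rest) := by
      simp only [pvSetCell, pv_pyIdx?_natCast, List.length_cons]
      rw [if_pos (by omega)]
      rfl
    rw [hset]
    have hlen : (p - 1 : Nat) = ((legend ++ c) :: cs).length - 1 := by
      simp only [List.length_cons]
      simp only [List.length_cons] at hr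
      omega
    rw [show (0 : Int) * (p : Int) + (p : Int) - 1 = ((p - 1 : Nat) : Int) by
      push_cast [Nat.cast_sub (Nat.one_le_iff_ne_zero.mpr (Nat.pos_iff_ne_zero.mp hp))]; ring]
    rw [hlen]
    have hmain := pv_lastNL_as_set ((legend ++ c) :: cs) (by simp) rest
    rw [List.cons_append] at hmain
    rw [hmain]
    rfl

theorem pv_foldl_shift (legend : List Char) (p : Nat) (hp : 0 < p) :
    ∀ (es : List Nat) (front rest : List (List Char)), front.length = p →
    (es.map (fun e => ((e + 1 : Nat) : Int))).foldl (pvStepA legend (p : Int)) (front ++ rest)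
      = front ++ (es.map (fun e => ((e : Nat) : Int))).foldl (pvStepA legend (p : Int)) rest := by
  intro es
  induction es with
  | nil => intro front rest _; simp
  | cons e es ih =>
    intro front rest hf
    simp only [List.map_cons, List.foldl_cons]
    rw [pv_step_shift legend p hp front rest hf e]
    exact ih front _ hf

theorem pv_loopA (legend : List Char) (p : Nat) (hp : 0 < p) :
    ∀ (k : Nat) (T : List (List Char)), T.length = k * p →
    ((List.range (k + 1)).map (fun e => ((e : Nat) : Int))).foldl (pvStepA legend (p : Int)) T
      = pvGold legend p k T := by
  intro k
  induction k with
  | zero =>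
    intro T hT
    have hT0 : T = [] := List.eq_nil_of_length_eq_zero (by simpa using hT)
    subst hT0
    simp [pvGold, pvStepA, PySem.List.pyGet?, PySem.List.pyIdx?]
  | succ k ih =>
    intro T hT
    have hTp : p ≤ T.length := by
      rw [hT]
      calc p = 1 * p := (one_mul p).symm
        _ ≤ (k + 1) * p := Nat.mul_le_mul_right p (by omega)
    have hrow : (T.take p).length = p := by simp [List.length_take]; omega
    have hrest : (T.drop p).length = k * p := by
      simp only [List.length_drop, hT, Nat.succ_mul]; omega
    conv_lhs => rw [← List.take_append_drop p T]
    rw [List.range_succ_eq_map]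
    simp only [List.map_cons, List.foldl_cons, List.map_map]
    rw [Nat.cast_zero, pv_step_zero legend p hp _ _ hrow]
    have hfun : ((fun e => ((e : Nat) : Int)) ∘ Nat.succ) = fun e : Nat => ((e + 1 : Nat) : Int) := by
      funext e; simp
    rw [hfun, pv_foldl_shift legend p hp (List.range (k + 1)) _ _ (by rw [pvDecorate_length]; exact hrow)]
    rw [ih (T.drop p) hrest]
    simp [pvGold]

theorem pv_update_items_le {κ ν : Type} [BEq κ] (ps : List (κ × ν)) :
    ∀ d : PySem.Dict κ ν, d.items.length ≤ (PySem.Dict.update d ps).items.length := by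
  induction ps with
  | nil => intro d; simp [PySem.Dict.update]
  | cons p ps ih =>
    intro d
    have h1 : d.items.length ≤ (d.insert p.1 p.2).items.length := by
      simp only [PySem.Dict.insert]; split_ifs <;> simp
    have h2 := ih (d.insert p.1 p.2)
    simp only [PySem.Dict.update, List.foldl_cons] at *
    omega

theorem pv_items_ofList_ne_nil {κ ν : Type} [BEq κ] (x : κ × ν) (xs : List (κ × ν)) :
    (PySem.Dict.ofList (x :: xs)).items ≠ [] := by
  have h := pv_update_items_le xs (PySem.Dict.empty.insert x.1 x.2)
  have h1 : 0 < (PySem.Dict.empty.insert x.1 x.2).items.length := by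
    simp [PySem.Dict.insert, PySem.Dict.empty, PySem.Dict.contains]
  have h2 : PySem.Dict.ofList (x :: xs) = PySem.Dict.update (PySem.Dict.empty.insert x.1 x.2) xs := by
    simp [PySem.Dict.ofList, PySem.Dict.update]
  rw [h2]
  intro hnil
  rw [← List.length_eq_zero_iff] at hnil
  omega

theorem pv_pad_eq {α : Type} (M : Int) (T0 : List α) (c : α) :
    (PySem.List.pyRange 0 M 1).foldl (fun t _ => t ++ [c]) T0 = T0 ++ List.replicate M.toNat c := by
  have h := PySem.List.foldl_append_singleton_eq_map (fun _ : Int => c) (PySem.List.pyRange 0 M 1) T0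
  have hmapc : ∀ l : List Int, l.map (fun _ => c) = List.replicate l.length c := by
    intro l; induction l with
    | nil => simp
    | cons x xs ih => simp [ih, List.replicate_succ]
  rw [h, hmapc, PySem.List.length_pyRange_one]
  norm_num

theorem pv_pad_dvd (P : Int) (hP : 0 < P) (L0 : Nat) :
    ∃ k : Nat, L0 + (PySem.Int.mod (P - PySem.Int.mod (L0 : Int) P) P).toNat = k * P.toNat := by
  rw [PySem.Int.mod_eq_emod_of_pos hP, PySem.Int.mod_eq_emod_of_pos hP]
  set m : Int := (P - (L0 : Int) % P) % P with hm
  have hm0 : 0 ≤ m := Int.emod_nonneg _ (ne_of_gt hP)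
  have hdvd : P ∣ ((L0 : Int) + m) := by
    have h1 : ((L0 : Int) + m) % P = 0 := by
      have e1 : ((L0 : Int) + m) % P = ((L0 : Int) + (P - (L0 : Int) % P)) % P := by
        rw [hm, Int.add_emod ((L0 : Int)) ((P - (L0 : Int) % P) % P) P,
          Int.emod_emod_of_dvd _ dvd_rfl, ← Int.add_emod]
      rw [e1]
      have e2 : (L0 : Int) + (P - (L0 : Int) % P) = P + P * ((L0 : Int) / P) := by
        rw [Int.emod_def]; ring
      rw [e2, Int.add_mul_emod_self_left, Int.emod_self]
    exact Int.dvd_of_emod_eq_zero h1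
  have hcast : ((L0 + m.toNat : Nat) : Int) = (L0 : Int) + m := by
    push_cast [Int.toNat_of_nonneg hm0]; ring
  have hdvdN : P.toNat ∣ (L0 + m.toNat) := by
    rw [← Int.natCast_dvd_natCast, hcast, Int.toNat_of_nonneg hP.le]
    exact hdvd
  exact ⟨(L0 + m.toNat) / P.toNat, (Nat.div_mul_cancel hdvdN).symm⟩

-- ---- B side: the flat position pass equals the row normal form, flattened ----

theorem pv_flatten_lastNL : ∀ (cs : List (List Char)), cs ≠ [] →
    (pvLastNL cs).flatten = cs.flatten ++ ['\n']
  | [], h => absurd rfl h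
  | [c], _ => by simp [pvLastNL]
  | c :: c2 :: cs', _ => by
    have ih := pv_flatten_lastNL (c2 :: cs') (by simp)
    simp only [pvLastNL, List.flatten_cons] at ih ⊢
    rw [ih]
    simp

theorem pv_flatten_decorate (legend : List Char) (row : List (List Char)) (h : row ≠ []) :
    (pvDecorate legend row).flatten = legend ++ row.flatten ++ ['\n'] := by
  cases row with
  | nil => exact absurd rfl h
  | cons c rest =>
    simp only [pvDecorate]
    rw [pv_flatten_lastNL _ (by simp)]
    simp

theorem pv_flatMap_getD (row : List (List Char)) :
    (List.range row.length).flatMap (fun j => row.getD j []) = row.flatten := by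
  induction row with
  | nil => simp
  | cons c rest ih =>
    rw [List.length_cons, List.range_succ_eq_map, List.flatMap_cons, List.flatMap_map]
    simp only [List.getD_cons_zero, List.getD_cons_succ]
    rw [ih]; simp

theorem pv_flatMap_core (row : List (List Char)) (m : Nat) (hr : row.length = m + 1) :
    (List.range (m + 1)).flatMap (fun j => row.getD j [] ++ (if j = m then ['\n'] else []))
      = row.flatten ++ ['\n'] := by
  rw [List.range_succ, List.flatMap_append, List.flatMap_singleton, if_pos rfl]
  have hcongr : (List.range m).flatMap (fun j => row.getD j [] ++ (if j = m then ['\n'] else []))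
      = (List.range m).flatMap (fun j => row.getD j []) := by
    simp only [List.flatMap]
    congr 1
    apply List.map_congr_left
    intro j hj
    rw [if_neg (Nat.ne_of_lt (List.mem_range.mp hj))]
    simp
  rw [hcongr]
  have h := pv_flatMap_getD row
  rw [hr, List.range_succ, List.flatMap_append, List.flatMap_singleton] at h
  rw [← List.append_assoc, h]

theorem pv_flatMap_legend_peel (L : List Char) (core : Nat → List Char) (m : Nat) :
    (List.range (m + 1)).flatMap (fun j => (if j = 0 then L else []) ++ core j)
      = L ++ (List.range (m + 1)).flatMap core := by
  conv_lhs => rw [List.range_succ_eq_map, List.flatMap_cons, List.flatMap_map]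
  conv_rhs => rw [List.range_succ_eq_map, List.flatMap_cons, List.flatMap_map]
  simp only [Nat.succ_ne_zero]
  simp



theorem pv_flatMap_row (legend : List Char) (row : List (List Char)) (p : Nat)
    (hr : row.length = p) (hp : 0 < p) :
    (List.range p).flatMap (fun j =>
        (if j % p = 0 then legend else []) ++ row.getD j [] ++ (if j % p = p - 1 then ['\n'] else []))
      = (pvDecorate legend row).flatten := by
  obtain ⟨m, rfl⟩ : ∃ m, p = m + 1 := ⟨p - 1, by omega⟩
  have hcongr : (List.range (m + 1)).flatMap (fun j =>
        (if j % (m + 1) = 0 then legend else []) ++ row.getD j [] ++ (if j % (m + 1) = (m + 1) - 1 then ['\n'] else []))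
      = (List.range (m + 1)).flatMap (fun j =>
        (if j = 0 then legend else []) ++ (row.getD j [] ++ (if j = m then ['\n'] else []))) := by
    simp only [List.flatMap]
    congr 1
    apply List.map_congr_left
    intro j hj
    rw [Nat.mod_eq_of_lt (List.mem_range.mp hj)]
    simp [List.append_assoc]
  rw [hcongr, pv_flatMap_legend_peel, pv_flatMap_core row m hr,
    pv_flatten_decorate legend row (by intro h; rw [h] at hr; simp at hr)]
  simp

theorem pv_flatMap_rows (legend : List Char) (p : Nat) (hp : 0 < p) :
    ∀ (k : Nat) (T : List (List Char)), T.length = k * p →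
    (List.range (k * p)).flatMap (fun j =>
        (if j % p = 0 then legend else []) ++ T.getD j [] ++ (if j % p = p - 1 then ['\n'] else []))
      = (pvGold legend p k T).flatten := by
  intro k
  induction k with
  | zero => intro T hT; simp [pvGold]
  | succ k ih =>
    intro T hT
    have hTp : p ≤ T.length := by rw [hT]; nlinarith [Nat.succ_le_succ (Nat.zero_le k)]
    have hrow : (T.take p).length = p := by simp [List.length_take]; omega
    have hrest : (T.drop p).length = k * p := by
      simp only [List.length_drop, hT, Nat.succ_mul]; omega
    have hsplit : (k + 1) * p = p + k * p := by ring
    rw [hsplit, List.range_add, List.flatMap_append, List.flatMap_map]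
    have hfirst : (List.range p).flatMap (fun j =>
          (if j % p = 0 then legend else []) ++ T.getD j [] ++ (if j % p = p - 1 then ['\n'] else []))
        = (pvDecorate legend (T.take p)).flatten := by
      rw [← pv_flatMap_row legend (T.take p) p hrow hp]
      simp only [List.flatMap]
      congr 1
      apply List.map_congr_left
      intro j hj
      have hjp := List.mem_range.mp hj
      rw [List.getD_eq_getElem?_getD, List.getD_eq_getElem?_getD, List.getElem?_take_of_lt hjp]
    have hsecond : (List.range (k * p)).flatMap (fun j =>
          (if (p + j) % p = 0 then legend else []) ++ T.getD (p + j) [] ++ (if (p + j) % p = p - 1 then ['\n'] else []))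
        = (pvGold legend p k (T.drop p)).flatten := by
      rw [← ih (T.drop p) hrest]
      simp only [List.flatMap]
      congr 1
      apply List.map_congr_left
      intro j hj
      rw [Nat.add_mod_left]
      congr 2
      rw [List.getD_eq_getElem?_getD, List.getD_eq_getElem?_getD, List.getElem?_drop]
    rw [hfirst, hsecond]
    simp [pvGold]

-- pvPiece at a nonnegative in-range index, read off the conceptual padded cell list
theorem pv_piece_eq (legend : List Char) (items : List (Int × String)) (p pad : Nat) (hp : 0 < p)
    (j : Nat) (hj : j < items.length + pad) :
    pvPiece legend items ((items.length : Nat) : Int) ((p : Nat) : Int) ((j : Nat) : Int)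
      = (if j % p = 0 then legend else [])
        ++ (items.map (fun kv => ' ' :: (PySem.Int.toChars kv.1 ++ ':' :: kv.2.toList))
            ++ List.replicate pad [' ', ' ', ' ', ' ', ' ']).getD j []
        ++ (if j % p = p - 1 then ['\n'] else []) := by
  have hc1 : (((j % p : Nat) : Int) = 0) ↔ (j % p = 0) := by omega
  have hc2 : (((j % p : Nat) : Int) = ((p : Nat) : Int) - 1) ↔ (j % p = p - 1) := by omega
  simp only [pvPiece, PySem.Int.mod_natCast, hc1, hc2]
  congr 2
  by_cases hn : j < items.length
  · rw [if_pos (show ((j : Nat) : Int) < ((items.length : Nat) : Int) by exact_mod_cast hn),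
      PySem.List.pyGet?_natCast, List.getElem?_eq_getElem hn]
    rw [List.getD_eq_getElem?_getD, List.getElem?_append_left (by simpa using hn),
      List.getElem?_map, List.getElem?_eq_getElem hn]
    rfl
  · rw [if_neg (show ¬ ((j : Nat) : Int) < ((items.length : Nat) : Int) by exact_mod_cast hn)]
    rw [List.getD_eq_getElem?_getD, List.getElem?_append_right (by simp; omega),
      List.getElem?_replicate]
    simp only [List.length_map]
    rw [if_pos (by omega)]
    rfl

-- A's row loop equals the normal form (the overshoot iteration is absorbed by pv_loopA's k+1 range)
theorem pv_tailA (legend : String) (P : Int) (hP : 0 < P) (k : Nat) (T : List (List Char))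
    (hT : T.length = k * P.toNat) :
    (PySem.List.pyRange 0 (1 + PySem.Int.floordiv (T.length : Int) P) 1).foldl
        (pvStepA legend.toList P) T
      = pvGold legend.toList P.toNat k T := by
  set p : Nat := P.toNat with hpdef
  have hPp : ((p : Nat) : Int) = P := Int.toNat_of_nonneg hP.le
  have hp : 0 < p := by omega
  rw [← hPp, hT]
  have hdiv : PySem.Int.floordiv (((k * p : Nat) : Int)) ((p : Nat) : Int) = ((k * p / p : Nat) : Int) :=
    PySem.Int.floordiv_natCast (k * p) p
  rw [hdiv, Nat.mul_div_cancel k hp]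
  have hrange1 : PySem.List.pyRange 0 (1 + (k : Int)) 1
      = (List.range (k + 1)).map (fun e => ((e : Nat) : Int)) := by
    rw [PySem.List.pyRange_one]
    have : ((1 + (k : Int)) - 0).toNat = k + 1 := by omega
    rw [this]
    apply List.map_congr_left
    intro e _
    omega
  rw [hrange1]
  exact pv_loopA legend.toList p hp k T hT

-- B's flat position pass equals the flattened normal form
theorem pv_tailB (legend : String) (items : List (Int × String)) (P : Int) (hP : 0 < P) (k : Nat)
    (hk : items.length + (PySem.Int.mod (P - PySem.Int.mod ((items.length : Nat) : Int) P) P).toNat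
        = k * P.toNat) :
    (PySem.List.pyRange 0
        (((items.length : Nat) : Int) + PySem.Int.mod (P - PySem.Int.mod ((items.length : Nat) : Int) P) P) 1).foldl
        (fun acc i => acc ++ pvPiece legend.toList items ((items.length : Nat) : Int) P i) []
      = (pvGold legend.toList P.toNat k
          (items.map (fun kv => ' ' :: (PySem.Int.toChars kv.1 ++ ':' :: kv.2.toList))
            ++ List.replicate (PySem.Int.mod (P - PySem.Int.mod ((items.length : Nat) : Int) P) P).toNat
              [' ', ' ', ' ', ' ', ' '])).flatten := by
  set p : Nat := P.toNat with hpdef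
  have hPp : ((p : Nat) : Int) = P := Int.toNat_of_nonneg hP.le
  have hp : 0 < p := by omega
  set padI : Int := PySem.Int.mod (P - PySem.Int.mod ((items.length : Nat) : Int) P) P with hpad
  have hpad0 : 0 ≤ padI := PySem.Int.mod_nonneg _ hP
  set pad : Nat := padI.toNat with hpadN
  have htot : ((items.length : Nat) : Int) + padI = ((items.length + pad : Nat) : Int) := by
    push_cast [hpadN, Int.toNat_of_nonneg hpad0]; ring
  rw [htot]
  have hrange : PySem.List.pyRange 0 ((items.length + pad : Nat) : Int) 1
      = (List.range (items.length + pad)).map (fun e => ((e : Nat) : Int)) := by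
    rw [PySem.List.pyRange_one]
    have : (((items.length + pad : Nat) : Int) - 0).toNat = items.length + pad := by omega
    rw [this]
    apply List.map_congr_left
    intro e _
    omega
  rw [hrange, PySem.List.foldl_append_eq_flatMap, List.nil_append, List.flatMap_map]
  have hbridge : (List.range (items.length + pad)).flatMap
        (fun j : Nat => pvPiece legend.toList items ((items.length : Nat) : Int) P ((j : Nat) : Int))
      = (List.range (items.length + pad)).flatMap (fun j =>
          (if j % p = 0 then legend.toList else [])
          ++ (items.map (fun kv => ' ' :: (PySem.Int.toChars kv.1 ++ ':' :: kv.2.toList))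
              ++ List.replicate pad [' ', ' ', ' ', ' ', ' ']).getD j []
          ++ (if j % p = p - 1 then ['\n'] else [])) := by
    simp only [List.flatMap]
    congr 1
    apply List.map_congr_left
    intro j hj
    have hjlt := List.mem_range.mp hj
    rw [← hPp]
    exact pv_piece_eq legend.toList items p pad hp j hjlt
  rw [hbridge]
  have hlen : (items.map (fun kv => ' ' :: (PySem.Int.toChars kv.1 ++ ':' :: kv.2.toList))
      ++ List.replicate pad [' ', ' ', ' ', ' ', ' ']).length = k * p := by
    simp [hk]
  rw [show items.length + pad = k * p by simpa using hk]
  exact pv_flatMap_rows legend.toList p hp k _ hlen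

-- ===== VERDICT (by name: the statement is the Claim_ definition above) =====
theorem antennaBlock_spec : Claim_equal_antennaBlock := by
  unfold Claim_equal_antennaBlock
  intro legend antprow antdict _hDom hPre
  obtain ⟨hnn, hnz⟩ := hPre
  unfold Spec_antennaBlock
  simp only [antennaBlock, antennaBlock_alt]
  set items := (PySem.Dict.ofList antdict).items with hitems
  set P : Int := if antprow = 0 then
      (if (items.length : Int) > 10 then PySem.Int.floordiv ((items.length : Int) + 1) 2
       else (items.length : Int)) else antprow with hPdef
  have hP : 0 < P := by
    by_cases h0 : antprow = 0
    · cases antdict with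
      | nil => exact absurd ⟨h0, rfl⟩ hnz
      | cons x xs =>
        have hne : items ≠ [] := by rw [hitems]; exact pv_items_ofList_ne_nil x xs
        have hlen : 0 < items.length := List.length_pos_of_ne_nil hne
        rw [hPdef, if_pos h0]
        split_ifs with h10
        · rw [PySem.Int.floordiv_eq_ediv_of_pos (by norm_num)]
          omega
        · exact_mod_cast hlen
    · rw [hPdef, if_neg h0]; omega
  set T0 : List (List Char) := items.map (fun kv => ' ' :: (PySem.Int.toChars kv.1 ++ ':' :: kv.2.toList)) with hT0
  rw [pv_pad_eq]
  have hT0len : T0.length = items.length := by simp [hT0]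
  rw [hT0len]
  obtain ⟨k, hk⟩ := pv_pad_dvd P hP items.length
  have hT : (T0 ++ List.replicate (PySem.Int.mod (P - PySem.Int.mod ((items.length : Nat) : Int) P) P).toNat
      [' ', ' ', ' ', ' ', ' ']).length = k * P.toNat := by
    rw [List.length_append, List.length_replicate, hT0len]
    exact hk
  rw [pv_tailA legend P hP k _ hT, pv_tailB legend items P hP k hk]
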